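-- pv_equiv track=rewrite | github.com/angushenderson/Huffman-Compression-Module | huffman_compression_tools.py | calculate_binary_tree_header_length
-- ===== SOURCE A (Python) =====
-- def calculate_binary_tree_header_length(postorder_tree_list: list) -> int:
--     """
--     Calculates the bit length of the binary tree stored in the file header from a given postorder list
--     :param postorder_tree_list: List of tree in postorder
--     :return length: Bit length of the binary tree stored in the file header
--     """
--     length = 0
--     for node in postorder_tree_list:
--         if node == None:
--             length += 1
--         else:
--             length += 8
--     # Count the padding as well
--     padding = 8 - length % 8
--     for i in range(padding):
--         length += 1
--     return length
-- ===== SOURCE B (Python) =====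
-- def calculate_binary_tree_header_length(postorder_tree_list: list) -> int:
--     """Closed-form: count None nodes, derive bit length arithmetically, pad to next multiple of 8."""
--     nones = postorder_tree_list.count(None)
--     length = 8 * len(postorder_tree_list) - 7 * nones
--     return (length // 8 + 1) * 8
-- ===== Notes on version B (the rewrite author's own statement) =====
-- stated objective: simpler
-- what changed: Replaced the per-element branch-accumulate loop and the per-bit padding loop with a single None count plus closed-form arithmetic (8*len - 7*nones, rounded up to the next multiple of 8).
import Mathlib
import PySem

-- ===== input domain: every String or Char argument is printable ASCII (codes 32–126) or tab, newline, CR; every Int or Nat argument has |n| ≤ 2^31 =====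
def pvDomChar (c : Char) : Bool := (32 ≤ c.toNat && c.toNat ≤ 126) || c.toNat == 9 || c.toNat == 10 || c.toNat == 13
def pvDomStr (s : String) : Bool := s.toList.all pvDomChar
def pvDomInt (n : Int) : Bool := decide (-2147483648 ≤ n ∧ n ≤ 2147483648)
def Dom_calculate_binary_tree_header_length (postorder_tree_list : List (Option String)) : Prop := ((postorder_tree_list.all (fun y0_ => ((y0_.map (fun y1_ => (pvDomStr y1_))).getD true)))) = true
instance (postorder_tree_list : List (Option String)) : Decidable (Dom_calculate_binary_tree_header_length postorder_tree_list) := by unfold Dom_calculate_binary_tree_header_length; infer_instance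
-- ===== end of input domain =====

-- B replaces A's per-element branch-accumulate and per-bit padding loops by a None count
-- plus closed-form arithmetic (objective: simpler).

-- ===== PORT A =====
def calculate_binary_tree_header_length (postorder_tree_list : List (Option String)) : Int :=
  let length : Int :=
    postorder_tree_list.foldl (fun length node => if node == none then length + 1 else length + 8) 0
  let padding : Int := 8 - PySem.Int.mod length 8
  (PySem.List.pyRange 0 padding 1).foldl (fun length _ => length + 1) length

-- ===== PORT B =====
def calculate_binary_tree_header_length_alt (postorder_tree_list : List (Option String)) : Int :=
  let nones : Int := (postorder_tree_list.count none : Int)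
  let length : Int := 8 * (postorder_tree_list.length : Int) - 7 * nones
  (PySem.Int.floordiv length 8 + 1) * 8

-- ===== PRECONDITION & SPEC =====
def Spec_calculate_binary_tree_header_length (postorder_tree_list : List (Option String)) (out : Int) : Prop := out = calculate_binary_tree_header_length_alt postorder_tree_list
instance (postorder_tree_list : List (Option String)) (out : Int) : Decidable (Spec_calculate_binary_tree_header_length postorder_tree_list out) := by unfold Spec_calculate_binary_tree_header_length; infer_instance

-- ===== CLAIM (what is proved, stated in full; the proofs are below) =====
def Claim_equal_calculate_binary_tree_header_length : Prop := ∀ (postorder_tree_list : List (Option String)), Dom_calculate_binary_tree_header_length postorder_tree_list → Spec_calculate_binary_tree_header_length postorder_tree_list (calculate_binary_tree_header_length postorder_tree_list)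

-- ===== LEMMAS AND PROOFS =====

-- A's accumulation loop equals the closed form 8*len - 7*(count of None).
theorem pv_fold_eq (xs : List (Option String)) (init : Int) :
    xs.foldl (fun length node => if node == none then length + 1 else length + 8) init
      = init + 8 * (xs.length : Int) - 7 * (xs.count none : Int) := by
  induction xs generalizing init with
  | nil => simp
  | cons x xs ih =>
    rw [List.foldl_cons, ih]
    cases x <;> simp <;> ring

-- A's padding loop adds exactly p (for 0 ≤ p).
theorem pv_pad_loop (p init : Int) (hp : 0 ≤ p) :
    (PySem.List.pyRange 0 p 1).foldl (fun length _ => length + 1) init = init + p := by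
  have h : ∀ (l : List Int) (i : Int), l.foldl (fun length _ => length + 1) i = i + l.length := by
    intro l; induction l with
    | nil => simp
    | cons a l ih => intro i; simp [ih]; ring
  rw [h, PySem.List.length_pyRange_one]
  omega

-- ===== VERDICT (by name: the statement is the Claim_ definition above) =====
theorem calculate_binary_tree_header_length_spec : Claim_equal_calculate_binary_tree_header_length := by
  intro xs _
  unfold Spec_calculate_binary_tree_header_length
  unfold calculate_binary_tree_header_length calculate_binary_tree_header_length_alt
  simp only [pv_fold_eq]
  set L : Int := 0 + 8 * (xs.length : Int) - 7 * (xs.count none : Int) with hL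
  have h8 : (0:Int) < 8 := by norm_num
  rw [PySem.Int.mod_eq_emod_of_pos h8, PySem.Int.floordiv_eq_ediv_of_pos h8]
  rw [pv_pad_loop _ _ (by omega : (0:Int) ≤ 8 - L % 8)]
  omega
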